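-- pv_equiv track=rewrite | github.com/kimgyuhee/Python | Chapter0_Algorithm/2305/230508/test01.py | solution
-- ===== SOURCE A (Python) =====
-- def compare_num(a, b) :
--     if a == b :
--         return True, 0
--     elif a > b :
--         return False, 0
--     else :
--         return False, 1
--
-- def solution(date1, date2):
--     answer = 0
--     for a, b, in zip(date1, date2) :
--         result, n = compare_num(a, b)
--         if not result :
--             answer = n
--             break
--     return answer
-- ===== SOURCE B (Python) =====
-- def solution(date1, date2):
--     n = min(len(date1), len(date2))
--     return 1 if date1[:n] < date2[:n] else 0
-- ===== Notes on version B (the rewrite author's own statement) =====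
-- stated objective: simpler
-- what changed: Replaces the explicit zip loop, compare_num helper, accumulator and early break with a single built-in lexicographic comparison of the two prefixes truncated to the common length.
import Mathlib
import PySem

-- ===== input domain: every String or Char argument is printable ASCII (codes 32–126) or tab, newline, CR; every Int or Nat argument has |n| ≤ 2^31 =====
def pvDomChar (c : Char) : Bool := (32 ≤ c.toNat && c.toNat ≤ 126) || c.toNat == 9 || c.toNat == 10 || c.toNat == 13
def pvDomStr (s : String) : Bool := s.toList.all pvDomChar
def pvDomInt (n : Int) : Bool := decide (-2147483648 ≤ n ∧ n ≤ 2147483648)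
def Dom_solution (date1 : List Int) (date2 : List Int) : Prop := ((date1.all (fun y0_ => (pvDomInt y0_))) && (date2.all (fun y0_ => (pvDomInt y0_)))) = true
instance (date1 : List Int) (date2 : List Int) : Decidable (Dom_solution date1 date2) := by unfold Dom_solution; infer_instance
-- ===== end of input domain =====

-- B replaces A's zip loop / compare_num helper / early break with one built-in
-- lexicographic comparison of the prefixes truncated to the common length (objective: simpler).
-- ===== PORT A =====
-- compare_num(a, b)
def compare_num (a b : Int) : Bool × Int :=
  if a = b then (true, 0)
  else if a > b then (false, 0)
  else (false, 1)

-- the 'for a, b in zip(...)' loop with early break, over the remaining pairs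
def solutionLoop : List (Int × Int) → Int
  | [] => 0
  | (a, b) :: rest =>
    let (result, n) := compare_num a b
    if !result then n else solutionLoop rest

def solution (date1 : List Int) (date2 : List Int) : Int :=
  solutionLoop (date1.zip date2)

-- ===== PORT B =====
-- Python's '<' on lists of ints (lexicographic, shorter strict prefix is smaller)
def pyListLt : List Int → List Int → Bool
  | _, [] => false
  | [], _ :: _ => true
  | a :: as_, b :: bs => if a < b then true else if b < a then false else pyListLt as_ bs

-- date1[:n] with 0 ≤ n is exactly List.take n
def solution_alt (date1 : List Int) (date2 : List Int) : Int :=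
  let n := min date1.length date2.length
  if pyListLt (date1.take n) (date2.take n) then 1 else 0

-- ===== PRECONDITION & SPEC =====
def Spec_solution (date1 : List Int) (date2 : List Int) (out : Int) : Prop := out = solution_alt date1 date2
instance (date1 : List Int) (date2 : List Int) (out : Int) : Decidable (Spec_solution date1 date2 out) := by unfold Spec_solution; infer_instance

-- ===== CLAIM (what is proved, stated in full; the proofs are below) =====
def Claim_equal_solution : Prop := ∀ (date1 : List Int) (date2 : List Int), Dom_solution date1 date2 → Spec_solution date1 date2 (solution date1 date2)

-- ===== LEMMAS AND PROOFS =====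

-- ===== VERDICT (by name: the statement is the Claim_ definition above) =====
theorem key : ∀ (xs ys : List Int),
    solutionLoop (xs.zip ys)
      = if pyListLt (xs.take (min xs.length ys.length)) (ys.take (min xs.length ys.length))
        then 1 else 0 := by
  intro xs
  induction xs with
  | nil => intro ys; simp [solutionLoop, pyListLt, List.zip]
  | cons a as_ ih =>
    intro ys
    cases ys with
    | nil => simp [solutionLoop, pyListLt, List.zip]
    | cons b bs =>
      have hmin : min (a :: as_).length (b :: bs).length
          = min as_.length bs.length + 1 := by
        simp [List.length_cons]
      simp only [List.zip_cons_cons, solutionLoop, compare_num, hmin, List.take_succ_cons,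
        pyListLt]
      by_cases hab : a = b
      · subst hab; simp [ih bs]
      · by_cases h1 : a < b
        · simp [hab, h1, not_lt.mpr (le_of_lt h1)]
        · have h2 : b < a := lt_of_le_of_ne (not_lt.mp h1) (Ne.symm hab)
          simp [hab, h1, h2]

theorem solution_spec : Claim_equal_solution := by
  intro date1 date2 _
  unfold Spec_solution solution solution_alt
  exact key date1 date2
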